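-- pv_equiv track=rewrite | github.com/alexlm78/AoC | 2025/Day06/solve_day06_part2.py | parse_worksheet_rtl
-- ===== SOURCE A (Python) =====
-- def parse_worksheet_rtl(lines):
--     """
--     Parse the worksheet reading right-to-left.
--     Each digit occupies its own column.
--     Numbers are formed by reading columns right-to-left,
--     with digits reading top-to-bottom within each column.
--     """
--     # Find the maximum line length to pad all lines
--     max_length = max(len(line) for line in lines)
--
--     # Pad all lines to the same length
--     padded_lines = [line.ljust(max_length) for line in lines]
--
--     # The last line contains the operations
--     operation_line = padded_lines[-1]
--     number_lines = padded_lines[:-1]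
--
--     # Work through columns to identify problems
--     num_cols = max_length
--     problems = []
--     current_problem_cols = []
--
--     for col_idx in range(num_cols):
--         # Extract this column from all lines
--         column_chars = [line[col_idx] if col_idx < len(line) else ' ' for line in number_lines]
--         operation_char = operation_line[col_idx] if col_idx < len(operation_line) else ' '
--
--         # Check if this column is part of a problem (has non-space content)
--         has_content = any(char.strip() for char in column_chars) or operation_char.strip()
--
--         if has_content:
--             current_problem_cols.append((column_chars, operation_char))
--         else:
--             # This is a separator column (all spaces)
--             if current_problem_cols:
--                 # We've finished collecting a problem
--                 problems.append(current_problem_cols)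
--                 current_problem_cols = []
--
--     # Don't forget the last problem if there is one
--     if current_problem_cols:
--         problems.append(current_problem_cols)
--
--     return problems
-- ===== SOURCE B (Python) =====
-- def _blank(col):
--     chars, op = col
--     return not any(ch.strip() for ch in chars) and not op.strip()
--
--
-- def parse_worksheet_rtl(lines):
--     # Two-pass: materialize every column first, then split the column list
--     # into maximal non-blank runs with a two-pointer scan.
--     max_length = max(len(line) for line in lines)
--     padded = [line.ljust(max_length) for line in lines]
--     cols = [([line[i] for line in padded[:-1]], padded[-1][i])
--             for i in range(max_length)]
--     problems = []
--     i, n = 0, len(cols)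
--     while i < n:
--         if _blank(cols[i]):
--             i += 1
--             continue
--         j = i + 1
--         while j < n and not _blank(cols[j]):
--             j += 1
--         problems.append(cols[i:j])
--         i = j
--     return problems
-- ===== Notes on version B (the rewrite author's own statement) =====
-- stated objective: alternative
-- what changed: A interleaves column extraction with stateful run-collection in one fold; B first materializes the whole list of column tuples and then splits it into maximal non-blank runs with a separate two-pointer scan.
import Mathlib
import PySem

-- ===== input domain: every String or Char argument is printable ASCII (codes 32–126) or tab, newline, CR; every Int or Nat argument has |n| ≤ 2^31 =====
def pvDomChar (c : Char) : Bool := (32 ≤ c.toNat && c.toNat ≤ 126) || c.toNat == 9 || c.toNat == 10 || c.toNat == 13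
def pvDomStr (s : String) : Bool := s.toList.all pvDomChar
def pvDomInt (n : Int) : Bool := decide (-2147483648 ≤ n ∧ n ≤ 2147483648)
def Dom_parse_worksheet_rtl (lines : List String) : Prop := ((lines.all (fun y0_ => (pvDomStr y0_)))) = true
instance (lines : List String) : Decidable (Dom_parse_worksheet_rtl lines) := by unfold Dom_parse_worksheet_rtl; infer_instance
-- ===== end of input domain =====

-- B materializes all column tuples first, then splits them into maximal non-blank runs in a
-- second pass (vs A's single stateful fold); same cost, different decomposition.

-- ===== PORT A =====
-- str.ljust(w): pad on the right with spaces to width w (exact)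
def pvLjust (s : String) (w : Nat) : String :=
  String.ofList (s.toList ++ List.replicate (w - s.toList.length) ' ')

-- the tuple A builds for column i: (column_chars over number_lines, operation_char)
def pvColA (number_lines : List String) (operation_line : String) (i : Nat) :
    List String × String :=
  (number_lines.map (fun line =>
      if i < line.toList.length then String.ofList [line.toList.getD i ' '] else " "),
   if i < operation_line.toList.length then String.ofList [operation_line.toList.getD i ' '] else " ")

-- has_content = any(char.strip() for char in column_chars) or operation_char.strip()
def pvHasContent (col : List String × String) : Bool :=
  col.1.any (fun c => PySem.Str.strip c != "") || (PySem.Str.strip col.2 != "")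

-- A's loop body
def pvStepA (st : List (List (List String × String)) × List (List String × String))
    (col : List String × String) :
    List (List (List String × String)) × List (List String × String) :=
  if pvHasContent col then (st.1, st.2 ++ [col])
  else if st.2 ≠ [] then (st.1 ++ [st.2], []) else st

def parse_worksheet_rtl (lines : List String) : List (List (List String × String)) :=
  let max_length := (lines.map (fun l => l.toList.length)).foldl Nat.max 0
  let padded := lines.map (fun l => pvLjust l max_length)
  let operation_line := padded.getLastD ""
  let number_lines := padded.dropLast
  let st := (List.range max_length).foldl
      (fun st i => pvStepA st (pvColA number_lines operation_line i)) ([], [])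
  if st.2 ≠ [] then st.1 ++ [st.2] else st.1

-- ===== PORT B =====
-- _blank(col) = not any(ch.strip() for ch in chars) and not op.strip()
def pvBlank (col : List String × String) : Bool :=
  !(col.1.any (fun c => PySem.Str.strip c != "")) && !(PySem.Str.strip col.2 != "")

-- the tuple B builds for column i: ([line[i] for line in padded[:-1]], padded[-1][i])
def pvColB (padded : List String) (i : Nat) : List String × String :=
  (padded.dropLast.map (fun line => String.ofList [line.toList.getD i ' ']),
   String.ofList [(padded.getLastD "").toList.getD i ' '])

-- B's two-pointer scan over the materialized column list, as structural recursion: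
-- skip a blank head; otherwise the inner while advances j to the end of the maximal
-- non-blank run (= takeWhile), and the scan resumes at j (= dropWhile).
def pvSplitRuns (cols : List (List String × String)) : List (List (List String × String)) :=
  match cols with
  | [] => []
  | c :: cs =>
    if pvBlank c then pvSplitRuns cs
    else (c :: cs.takeWhile (fun x => !pvBlank x)) ::
         pvSplitRuns (cs.dropWhile (fun x => !pvBlank x))
termination_by cols.length
decreasing_by
  · simp
  · have h := List.length_dropWhile_le (p := fun x => !pvBlank x) (l := cs)
    simp; omega

def parse_worksheet_rtl_alt (lines : List String) : List (List (List String × String)) :=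
  let max_length := (lines.map (fun l => l.toList.length)).foldl Nat.max 0
  let padded := lines.map (fun l => pvLjust l max_length)
  let cols := (List.range max_length).map (fun i => pvColB padded i)
  pvSplitRuns cols

-- ===== PRECONDITION & SPEC =====
-- Pre_ excludes only the empty list, on which A's max() raises ValueError.
def Pre_parse_worksheet_rtl (lines : List String) : Prop := lines ≠ []
instance (lines : List String) : Decidable (Pre_parse_worksheet_rtl lines) := by
  unfold Pre_parse_worksheet_rtl; infer_instance

def pvWitness_parse_worksheet_rtl : List String := ["12 34", "+  * "]

def Spec_parse_worksheet_rtl (lines : List String) (out : List (List (List String × String))) : Prop := out = parse_worksheet_rtl_alt lines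
instance (lines : List String) (out : List (List (List String × String))) : Decidable (Spec_parse_worksheet_rtl lines out) := by unfold Spec_parse_worksheet_rtl; infer_instance

-- ===== CLAIM (what is proved, stated in full; the proofs are below) =====
def Claim_equal_parse_worksheet_rtl : Prop := ∀ (lines : List String), Dom_parse_worksheet_rtl lines → Pre_parse_worksheet_rtl lines → Spec_parse_worksheet_rtl lines (parse_worksheet_rtl lines)

-- ===== LEMMAS AND PROOFS =====

theorem pvHasContent_eq (col : List String × String) : pvHasContent col = !pvBlank col := by
  simp [pvHasContent, pvBlank]

-- A's fold + final flush equals B's run-splitter, generalized over the accumulator.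
theorem pvFold_eq_splitRuns (cols : List (List String × String))
    (probs : List (List (List String × String))) (cur : List (List String × String)) :
    (if (cols.foldl pvStepA (probs, cur)).2 ≠ [] then
       (cols.foldl pvStepA (probs, cur)).1 ++ [(cols.foldl pvStepA (probs, cur)).2]
     else (cols.foldl pvStepA (probs, cur)).1) =
    (if cur = [] then probs ++ pvSplitRuns cols
     else probs ++ (cur ++ cols.takeWhile (fun x => !pvBlank x)) ::
            pvSplitRuns (cols.dropWhile (fun x => !pvBlank x))) := by
  induction cols generalizing probs cur with
  | nil =>
    by_cases h : cur = [] <;> simp [pvSplitRuns, h]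
  | cons c cs ih =>
    simp only [List.foldl_cons]
    by_cases hb : pvBlank c = true
    · have hst : pvStepA (probs, cur) c = if cur ≠ [] then (probs ++ [cur], []) else (probs, cur) := by
        simp [pvStepA, pvHasContent_eq, hb]
      by_cases hc : cur = []
      · subst hc
        simp only [hst]; simp only [ne_eq, not_true_eq_false, if_false]
        rw [ih]
        simp [pvSplitRuns, hb]
      · rw [hst]; simp only [ne_eq, hc, not_false_iff, if_true]
        rw [ih]
        simp [pvSplitRuns, hb]
    · have hst : pvStepA (probs, cur) c = (probs, cur ++ [c]) := by
        simp [pvStepA, pvHasContent_eq, hb]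
      rw [hst, ih]
      have hcc : cur ++ [c] ≠ [] := by simp
      simp only [hcc, if_false]
      by_cases hc : cur = []
      · subst hc
        simp [pvSplitRuns, hb]
      · simp [hc, hb]

theorem pvLjust_length (s : String) (w : Nat) (h : s.toList.length ≤ w) :
    (pvLjust s w).toList.length = w := by
  have ht : (pvLjust s w).toList = s.toList ++ List.replicate (w - s.toList.length) ' ' := by
    simp [pvLjust]
  rw [ht, List.length_append, List.length_replicate]; omega

theorem pvLen_le_max (lines : List String) (l : String) (h : l ∈ lines) :
    l.toList.length ≤ (lines.map (fun l => l.toList.length)).foldl Nat.max 0 := by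
  induction lines generalizing l with
  | nil => cases h
  | cons x xs ih =>
    simp only [List.map_cons, List.foldl_cons]
    have base : ∀ (a : Nat) (ys : List Nat), a ≤ ys.foldl Nat.max a := by
      intro a ys
      induction ys generalizing a with
      | nil => exact le_refl a
      | cons y ys ih2 => exact le_trans (Nat.le_max_left a y) (ih2 _)
    have mono : ∀ (ys : List Nat) (a b : Nat), a ≤ b → ys.foldl Nat.max a ≤ ys.foldl Nat.max b := by
      intro ys
      induction ys with
      | nil => intro a b hab; simpa using hab
      | cons y ys ih2 => intro a b hab; exact ih2 _ _ (sup_le_sup_right hab y)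
    rcases List.mem_cons.mp h with h | h
    · subst h; exact le_trans (Nat.le_max_right 0 l.toList.length) (base _ _)
    · exact le_trans (ih _ h) (mono _ 0 _ (Nat.zero_le _))

-- On columns in range, A's tuple equals B's tuple.
theorem pvColA_eq_colB (padded : List String) (w : Nat) (hpne : padded ≠ [])
    (hlen : ∀ p ∈ padded, p.toList.length = w) (i : Nat) (hi : i < w) :
    pvColA padded.dropLast (padded.getLastD "") i = pvColB padded i := by
  unfold pvColA pvColB
  simp only [Prod.mk.injEq]
  refine ⟨?_, ?_⟩
  · apply List.map_congr_left
    intro line hline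
    have hl : line.toList.length = w := hlen _ (List.mem_of_mem_dropLast hline)
    rw [if_pos (by omega)]
  · have hmem : padded.getLastD "" ∈ padded := by
      rcases List.exists_cons_of_ne_nil hpne with ⟨a, as, rfl⟩
      simp [List.getLastD]
    have hl : (padded.getLastD "").toList.length = w := hlen _ hmem
    rw [if_pos (by omega)]

theorem pvPadded_len (lines : List String) :
    ∀ p ∈ lines.map (fun l => pvLjust l ((lines.map (fun l => l.toList.length)).foldl Nat.max 0)),
      p.toList.length = (lines.map (fun l => l.toList.length)).foldl Nat.max 0 := by
  intro p hp
  rcases List.mem_map.mp hp with ⟨l, hl, rfl⟩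
  exact pvLjust_length _ _ (pvLen_le_max _ _ hl)

-- ===== VERDICT (by name: the statement is the Claim_ definition above) =====
theorem parse_worksheet_rtl_spec : Claim_equal_parse_worksheet_rtl := by
  intro lines _ hpre
  unfold Spec_parse_worksheet_rtl parse_worksheet_rtl parse_worksheet_rtl_alt
  dsimp only
  have hpne : lines.map (fun l => pvLjust l ((lines.map (fun l => l.toList.length)).foldl Nat.max 0)) ≠ [] := by
    simpa using hpre
  have h1 : (List.range ((lines.map (fun l => l.toList.length)).foldl Nat.max 0)).foldl
        (fun st i => pvStepA st
          (pvColA ((lines.map (fun l => pvLjust l ((lines.map (fun l => l.toList.length)).foldl Nat.max 0))).dropLast)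
                  ((lines.map (fun l => pvLjust l ((lines.map (fun l => l.toList.length)).foldl Nat.max 0))).getLastD "") i))
        ([], [])
      = (List.range ((lines.map (fun l => l.toList.length)).foldl Nat.max 0)).foldl
        (fun st i => pvStepA st
          (pvColB (lines.map (fun l => pvLjust l ((lines.map (fun l => l.toList.length)).foldl Nat.max 0))) i))
        ([], []) := by
    apply PySem.List.foldl_congr_mem
    intro acc i hi
    rw [pvColA_eq_colB _ _ hpne (pvPadded_len lines) i (List.mem_range.mp hi)]
  have h2 : ((List.range ((lines.map (fun l => l.toList.length)).foldl Nat.max 0)).map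
        (fun i => pvColB (lines.map (fun l => pvLjust l ((lines.map (fun l => l.toList.length)).foldl Nat.max 0))) i)).foldl
        pvStepA ([], [])
      = (List.range ((lines.map (fun l => l.toList.length)).foldl Nat.max 0)).foldl
        (fun st i => pvStepA st
          (pvColB (lines.map (fun l => pvLjust l ((lines.map (fun l => l.toList.length)).foldl Nat.max 0))) i))
        ([], []) := by rw [List.foldl_map]
  rw [h1, ← h2, pvFold_eq_splitRuns]
  simp
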